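-- pv_equiv track=rewrite | github.com/SuhJaeHo/algorithm | Programmers/Complete/Lv2/프로세스.py | solution
-- ===== SOURCE A (Python) =====
-- from collections import deque
--
-- def solution(priorities, location):
--     answer = 0
--
--     queue = deque([(priorities[i], i) for i in range(len(priorities))])
--
--     while queue:
--         max = 0
--         for i in range(len(queue)):
--             if queue[i][0] > max:
--                 max = queue[i][0]
--
--         val, idx = queue.popleft()
--
--         if val != max:
--             queue.append((val, idx))
--         else:
--             answer += 1
--             if idx == location:
--                 return answer
--
--     return answer
-- ===== SOURCE B (Python) =====
-- def solution(priorities, location):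
--     # Batched rotation: find the first maximum once, pop it, and rotate the
--     # skipped prefix to the back in one slice -- no per-step max rescans, no
--     # element-by-element requeueing.
--     answer = 0
--     q = list(range(len(priorities)))          # queue of original positions
--     while q:
--         m = max(priorities[i] for i in q)
--         k = next(j for j, i in enumerate(q) if priorities[i] == m)
--         answer += 1
--         if q[k] == location:
--             return answer
--         q = q[k + 1:] + q[:k]
--     return answer
-- ===== Notes on version B (the rewrite author's own statement) =====
-- stated objective: faster
-- what changed: B drops the deque simulation's one-step rotate-and-rescan: per pop it finds the maximum and its first position once (max + generator scan) and rotates the skipped prefix to the back in a single slice, instead of re-scanning the whole queue for the max before every single front-to-back move.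
-- outside the precondition, e.g. on solution([5, -3], 0): A returns 1, B returns 1
import Mathlib
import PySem

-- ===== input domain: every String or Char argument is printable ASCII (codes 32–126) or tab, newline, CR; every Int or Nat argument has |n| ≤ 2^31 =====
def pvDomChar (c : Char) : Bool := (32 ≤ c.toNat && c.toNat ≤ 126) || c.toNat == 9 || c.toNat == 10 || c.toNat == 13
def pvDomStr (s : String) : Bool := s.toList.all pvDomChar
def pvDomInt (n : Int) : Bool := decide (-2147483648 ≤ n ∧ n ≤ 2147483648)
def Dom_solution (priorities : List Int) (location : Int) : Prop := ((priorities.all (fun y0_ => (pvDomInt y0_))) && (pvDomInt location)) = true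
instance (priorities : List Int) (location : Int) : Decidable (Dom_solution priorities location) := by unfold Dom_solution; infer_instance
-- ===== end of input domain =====

-- B replaces A's one-step rotate-and-rescan deque simulation by a batched step (find the
-- first maximum once per pop, rotate the skipped prefix in one slice); measured faster.

-- priorities[i]; every use is with an index 0 ≤ i < len(priorities), where pyGet? is some
def pval (priorities : List Int) (i : Int) : Int := (PySem.List.pyGet? priorities i).getD 0

-- ===== PORT A =====
-- the inner 'for i in range(len(queue)): if queue[i][0] > max: max = queue[i][0]' scan (init 0)
def aScanMax (q : List (Int × Int)) : Int := q.foldl (fun m p => if p.1 > m then p.1 else m) 0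

-- the while loop; fuel is a totality guard only (A diverges when only negative
-- priorities remain; under Pre_ the supplied fuel is proved sufficient)
def aLoop (location : Int) : Nat → List (Int × Int) → Int → Int
  | 0, _, answer => answer
  | _ + 1, [], answer => answer
  | fuel + 1, (val, idx) :: rest, answer =>
    let mx := aScanMax ((val, idx) :: rest)
    if val ≠ mx then aLoop location fuel (rest ++ [(val, idx)]) answer
    else if idx = location then answer + 1
    else aLoop location fuel rest (answer + 1)

def solution (priorities : List Int) (location : Int) : Int :=
  aLoop location ((priorities.length + 1) * (priorities.length + 1))
    ((PySem.List.pyRange 0 (priorities.length : Int) 1).map (fun i => (pval priorities i, i))) 0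

-- ===== PORT B =====
-- fuel is a totality guard; each iteration drops one element, length + 1 suffices
def bLoop (priorities : List Int) (location : Int) : Nat → List Int → Int → Int
  | 0, _, answer => answer
  | _ + 1, [], answer => answer
  | fuel + 1, i0 :: rest, answer =>
    let m := (PySem.List.max? ((i0 :: rest).map (fun i => pval priorities i)) (fun y => y)).getD 0
    let k := (i0 :: rest).findIdx (fun i => pval priorities i == m)
    if (PySem.List.pyGet? (i0 :: rest) (k : Int)).getD 0 = location then answer + 1
    else bLoop priorities location fuel ((i0 :: rest).drop (k+1) ++ (i0 :: rest).take k) (answer + 1)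

def solution_alt (priorities : List Int) (location : Int) : Int :=
  bLoop priorities location (priorities.length + 1)
    (PySem.List.pyRange 0 (priorities.length : Int) 1) 0

-- ===== PRECONDITION & SPEC =====
-- Pre_ excludes lists containing a negative priority: there A's max-with-0 sentinel makes the
-- loop run forever once only negative items remain, so A diverges on many such inputs; on the
-- negative-priority inputs where A does return first, B returns the same value, but that
-- terminating set is not closed-form (it depends on the simulation), so all are excluded.
def Pre_solution (priorities : List Int) (location : Int) : Prop := ∀ p ∈ priorities, 0 ≤ p
instance (priorities : List Int) (location : Int) : Decidable (Pre_solution priorities location) := by unfold Pre_solution; infer_instance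
def pvWitness_solution : List Int × Int := ([2, 1, 3, 2], 2)

def Spec_solution (priorities : List Int) (location : Int) (out : Int) : Prop := out = solution_alt priorities location
instance (priorities : List Int) (location : Int) (out : Int) : Decidable (Spec_solution priorities location out) := by unfold Spec_solution; infer_instance

-- ===== CLAIM (what is proved, stated in full; the proofs are below) =====
def Claim_equal_solution : Prop := ∀ (priorities : List Int) (location : Int), Dom_solution priorities location → Pre_solution priorities location → Spec_solution priorities location (solution priorities location)

-- ===== LEMMAS AND PROOFS =====

theorem aLoop_nil (loc : Int) (fuel : Nat) (ans : Int) : aLoop loc fuel [] ans = ans := by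
  cases fuel <;> simp [aLoop]

theorem aLoop_cons (loc : Int) (fuel : Nat) (v i : Int) (rest : List (Int × Int)) (ans : Int) :
    aLoop loc (fuel + 1) ((v, i) :: rest) ans =
      if v ≠ aScanMax ((v, i) :: rest) then aLoop loc fuel (rest ++ [(v, i)]) ans
      else if i = loc then ans + 1
      else aLoop loc fuel rest (ans + 1) := by
  simp [aLoop]

theorem foldl_max_swap (l : List Int) : ∀ z w : Int, l.foldl max (max z w) = max w (l.foldl max z) := by
  induction l with
  | nil => intro z w; simp [max_comm]
  | cons x t ih =>
    intro z w
    simp only [List.foldl_cons]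
    rw [show max (max z w) x = max (max z x) w by rw [max_right_comm], ih]

theorem aScanMax_eq_foldl (q : List (Int × Int)) :
    aScanMax q = (q.map (fun p => p.1)).foldl max 0 := by
  unfold aScanMax
  rw [List.foldl_map]
  congr 1
  funext m p
  rcases le_or_gt p.1 m with h | h
  · simp [not_lt.mpr h, max_eq_left h]
  · simp [h, max_eq_right (le_of_lt h)]

theorem foldl_max_zero_nonneg (l : List Int) : 0 ≤ l.foldl max 0 := by
  induction l with
  | nil => simp
  | cons x t ih =>
    simp only [List.foldl_cons]
    calc (0:Int) ≤ t.foldl max 0 := ih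
    _ ≤ max x (t.foldl max 0) := le_max_right _ _
    _ = t.foldl max (max 0 x) := by rw [foldl_max_swap t 0 x, max_comm]

theorem foldl_max_zero_append (a b : List Int) :
    (a ++ b).foldl max 0 = max ((a).foldl max 0) ((b).foldl max 0) := by
  rw [List.foldl_append]
  have h : a.foldl max 0 = max 0 (a.foldl max 0) := (max_eq_right (foldl_max_zero_nonneg a)).symm
  rw [h, foldl_max_swap b 0 (a.foldl max 0)]
  rw [← h, max_comm]

theorem aScanMax_rot (l t : List (Int × Int)) : aScanMax (l ++ t) = aScanMax (t ++ l) := by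
  rw [aScanMax_eq_foldl, aScanMax_eq_foldl, List.map_append, List.map_append,
    foldl_max_zero_append, foldl_max_zero_append, max_comm]

-- rotating the non-max prefix to the back, one A-iteration per element
theorem rotate_lemma :
    ∀ (l : List (Int × Int)) (r : List (Int × Int)) (v i loc ans : Int) (fuel : Nat),
      (∀ p ∈ l, p.1 ≠ aScanMax (l ++ (v, i) :: r)) →
      v = aScanMax (l ++ (v, i) :: r) →
      aLoop loc (fuel + l.length) (l ++ (v, i) :: r) ans = aLoop loc fuel ((v, i) :: (r ++ l)) ans := by
  intro l
  induction l with
  | nil => intro r v i loc ans fuel _ _; simp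
  | cons x l' ih =>
    intro r v i loc ans fuel hne hv
    obtain ⟨xv, xi⟩ := x
    have hx : xv ≠ aScanMax ((xv, xi) :: (l' ++ (v, i) :: r)) := by
      have := hne (xv, xi) (List.mem_cons_self)
      simpa using this
    have hrot : aScanMax (l' ++ (v, i) :: (r ++ [(xv, xi)])) = aScanMax ((xv, xi) :: (l' ++ (v, i) :: r)) := by
      have := aScanMax_rot [(xv, xi)] (l' ++ (v, i) :: r)
      simpa using this.symm
    have step : aLoop loc (fuel + (l'.length + 1)) (((xv, xi) :: l') ++ (v, i) :: r) ans
        = aLoop loc (fuel + l'.length) (l' ++ (v, i) :: (r ++ [(xv, xi)])) ans := by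
      have := aLoop_cons loc (fuel + l'.length) xv xi (l' ++ (v, i) :: r) ans
      rw [show fuel + (l'.length + 1) = (fuel + l'.length) + 1 by omega]
      simp only [List.cons_append]
      rw [this, if_pos hx]
      simp
    rw [show ((xv, xi) :: l').length = l'.length + 1 by simp]
    rw [step]
    have ih' := ih (r ++ [(xv, xi)]) v i loc ans fuel
      (by intro p hp
          have := hne p (List.mem_cons_of_mem _ hp)
          rw [hrot]
          simpa using this)
      (by rw [hrot]; simpa using hv)
    rw [ih']
    congr 1
    simp

theorem pval_mem (priorities : List Int) (i : Int) (h0 : 0 ≤ i) (h1 : i < (priorities.length : Int)) :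
    pval priorities i ∈ priorities := by
  obtain ⟨k, rfl⟩ : ∃ k : Nat, i = (k : Int) := ⟨i.toNat, (Int.toNat_of_nonneg h0).symm⟩
  have hk : k < priorities.length := by exact_mod_cast h1
  simp [pval, hk]

-- with a nonnegative head, B's max(...) equals A's 0-seeded running max
theorem bmax_eq_scan (x : Int) (t : List Int) (hx : 0 ≤ x) :
    (PySem.List.max? (x :: t) (fun y => y)).getD 0 = (x :: t).foldl max 0 := by
  rw [PySem.List.max?_id_cons]
  simp only [Option.getD_some, List.foldl_cons]
  rw [show max 0 x = x from max_eq_right hx]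

-- the main simulation correspondence, by induction on the queue length
theorem main_lemma (priorities : List Int) (loc : Int) (hP : ∀ p ∈ priorities, 0 ≤ p) :
    ∀ (n : Nat) (q : List Int) (fa fb : Nat) (ans : Int),
      q.length = n →
      (∀ i ∈ q, 0 ≤ i ∧ i < (priorities.length : Int)) →
      aLoop loc (fa + (n * n + 2 * n)) (q.map (fun i => (pval priorities i, i))) ans
        = bLoop priorities loc (fb + (n + 1)) q ans := by
  intro n
  induction n with
  | zero =>
    intro q fa fb ans hlen _
    have hq : q = [] := List.length_eq_zero_iff.mp hlen
    subst hq
    simp only [List.map_nil]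
    rw [aLoop_nil]
    cases fb <;> simp [bLoop]
  | succ n' ih =>
    intro q fa fb ans hlen hq
    obtain ⟨i0, rest, rfl⟩ : ∃ i0 rest, q = i0 :: rest := by
      cases q with
      | nil => simp at hlen
      | cons a b => exact ⟨a, b, rfl⟩
    have hF0 : 0 ≤ pval priorities i0 :=
      hP _ (pval_mem priorities i0 (hq i0 List.mem_cons_self).1 (hq i0 List.mem_cons_self).2)
    -- B's maximum
    have hmfold : (PySem.List.max? ((i0 :: rest).map (fun i => pval priorities i)) (fun y => y)).getD 0
        = ((i0 :: rest).map (fun i => pval priorities i)).foldl max 0 := by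
      rw [List.map_cons]
      exact bmax_eq_scan _ _ hF0
    set m := (PySem.List.max? ((i0 :: rest).map (fun i => pval priorities i)) (fun y => y)).getD 0 with hmdef
    set k := (i0 :: rest).findIdx (fun i => pval priorities i == m) with hkdef
    have hsome : PySem.List.max? ((i0 :: rest).map (fun i => pval priorities i)) (fun y => y)
        = some m := by
      rw [hmdef, List.map_cons, PySem.List.max?_id_cons]
      rfl
    have hmmem : m ∈ (i0 :: rest).map (fun i => pval priorities i) := PySem.List.max?_mem hsome
    have hex : ∃ x ∈ (i0 :: rest), (fun i => pval priorities i == m) x = true := by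
      obtain ⟨j, hj, hjm⟩ := List.mem_map.mp hmmem
      exact ⟨j, hj, by simp [hjm]⟩
    have hk : k < (i0 :: rest).length := by
      rw [hkdef]; exact List.findIdx_lt_length.mpr hex
    have hFk : pval priorities ((i0 :: rest)[k]) = m := by
      have := List.findIdx_getElem (p := fun i => pval priorities i == m) (xs := i0 :: rest)
        (w := by rw [← hkdef]; exact hk)
      simpa [← hkdef] using this
    -- the scan maximum of the pair queue equals m
    have hscan : aScanMax ((i0 :: rest).map (fun i => (pval priorities i, i))) = m := by
      rw [aScanMax_eq_foldl, List.map_map]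
      rw [hmfold]
      rfl
    have hdecomp : (i0 :: rest)
        = (i0 :: rest).take k ++ (i0 :: rest)[k] :: (i0 :: rest).drop (k + 1) := by
      rw [List.getElem_cons_drop hk, List.take_append_drop]
    have hlt : ∀ j ∈ (i0 :: rest).take k, pval priorities j ≠ m := by
      intro j hj hjm
      obtain ⟨t, ht, hjt⟩ := List.getElem_of_mem hj
      have htk : t < k := by
        have := ht
        simp [List.length_take] at this
        omega
      have htlen : t < (i0 :: rest).length := lt_trans htk hk
      have hgt : ((i0 :: rest).take k)[t] = (i0 :: rest)[t] := List.getElem_take ..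
      have := List.not_of_lt_findIdx (p := fun i => pval priorities i == m) (xs := i0 :: rest)
        (by rw [← hkdef]; exact htk)
      rw [hgt] at hjt
      have hpj : pval priorities ((i0 :: rest)[t]'htlen) = m := by rw [hjt]; exact hjm
      rw [beq_eq_false_iff_ne] at this
      exact this hpj
    -- A side: rotate the prefix before the first maximum, then pop it
    have hkn : k ≤ n' := by
      rw [hlen] at hk
      omega
    have hsq : (n' + 1) * (n' + 1) = n' * n' + 2 * n' + 1 := by ring
    have harith : fa + ((n' + 1) * (n' + 1) + 2 * (n' + 1))
        = (((fa + (2 * n' + 2 - k)) + (n' * n' + 2 * n')) + 1) + k := by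
      omega
    have hrotscan : aScanMax (((i0 :: rest).take k).map (fun i => (pval priorities i, i))
          ++ (pval priorities ((i0 :: rest)[k]), ((i0 :: rest)[k]))
            :: ((i0 :: rest).drop (k + 1)).map (fun i => (pval priorities i, i))) = m := by
      rw [show (pval priorities ((i0 :: rest)[k]), ((i0 :: rest)[k]))
            :: ((i0 :: rest).drop (k + 1)).map (fun i => (pval priorities i, i))
          = ((i0 :: rest)[k] :: (i0 :: rest).drop (k + 1)).map (fun i => (pval priorities i, i)) by
        simp]
      rw [← List.map_append, ← hdecomp]
      exact hscan
    have hA : aLoop loc (fa + ((n' + 1) * (n' + 1) + 2 * (n' + 1)))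
        ((i0 :: rest).map (fun i => (pval priorities i, i))) ans
        = if ((i0 :: rest)[k] : Int) = loc then ans + 1
          else aLoop loc ((fa + (2 * n' + 2 - k)) + (n' * n' + 2 * n'))
            ((((i0 :: rest).drop (k + 1) ++ (i0 :: rest).take k)).map (fun i => (pval priorities i, i)))
            (ans + 1) := by
      conv_lhs => rw [hdecomp]
      rw [List.map_append, List.map_cons, harith]
      rw [show (((fa + (2 * n' + 2 - k)) + (n' * n' + 2 * n')) + 1) + k
          = (((fa + (2 * n' + 2 - k)) + (n' * n' + 2 * n')) + 1)
            + (((i0 :: rest).take k).map (fun i => (pval priorities i, i))).length by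
        rw [List.length_map, List.length_take, min_eq_left (le_of_lt hk)]]
      rw [rotate_lemma _ _ _ _ _ _ _
        (by intro p hp
            rw [hrotscan]
            obtain ⟨j, hj, rfl⟩ := List.mem_map.mp hp
            exact hlt j hj)
        (by rw [hrotscan]; exact hFk)]
      rw [aLoop_cons]
      have hmx : aScanMax ((pval priorities ((i0 :: rest)[k]), ((i0 :: rest)[k]))
          :: (((i0 :: rest).drop (k + 1)).map (fun i => (pval priorities i, i))
            ++ ((i0 :: rest).take k).map (fun i => (pval priorities i, i)))) = m := by
        rw [← hrotscan, ← aScanMax_rot]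
        simp
      rw [hmx, if_neg (by simp [hFk])]
      rw [List.map_append]
    -- B side: one unfolding of bLoop
    have hBidx : (PySem.List.pyGet? (i0 :: rest) (k : Int)).getD 0 = (i0 :: rest)[k] := by
      simp [List.getElem?_eq_getElem hk]
    have hB : bLoop priorities loc (fb + (n' + 1 + 1)) (i0 :: rest) ans
        = if ((i0 :: rest)[k] : Int) = loc then ans + 1
          else bLoop priorities loc (fb + (n' + 1))
            ((i0 :: rest).drop (k + 1) ++ (i0 :: rest).take k) (ans + 1) := by
      rw [show fb + (n' + 1 + 1) = (fb + (n' + 1)) + 1 by omega]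
      conv_lhs => rw [bLoop]
      rw [← hmdef, ← hkdef, hBidx]
    rw [hA, hB]
    by_cases hloc : ((i0 :: rest)[k] : Int) = loc
    · rw [if_pos hloc, if_pos hloc]
    · rw [if_neg hloc, if_neg hloc]
      exact ih ((i0 :: rest).drop (k + 1) ++ (i0 :: rest).take k)
        (fa + (2 * n' + 2 - k)) fb (ans + 1)
        (by simp [List.length_take]
            simp at hk hlen
            omega)
        (by intro i hi
            rcases List.mem_append.mp hi with h | h
            · exact hq i (List.mem_of_mem_drop h)
            · exact hq i (List.mem_of_mem_take h))

-- ===== VERDICT (by name: the statement is the Claim_ definition above) =====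
theorem solution_spec : Claim_equal_solution := by
  intro priorities location _hdom hpre
  show solution priorities location = solution_alt priorities location
  unfold solution solution_alt
  have hlen : (PySem.List.pyRange 0 (priorities.length : Int) 1).length = priorities.length := by
    simp [PySem.List.length_pyRange_one]
  have hmem : ∀ i ∈ PySem.List.pyRange 0 (priorities.length : Int) 1,
      0 ≤ i ∧ i < (priorities.length : Int) := by
    intro i hi
    have := (PySem.List.mem_pyRange_one).1 hi
    exact this
  have := main_lemma priorities location hpre priorities.length
    (PySem.List.pyRange 0 (priorities.length : Int) 1) 1 0 0 hlen hmem
  rw [show (priorities.length + 1) * (priorities.length + 1)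
      = 1 + (priorities.length * priorities.length + 2 * priorities.length) by ring]
  rw [this]
  norm_num
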